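-- pv_equiv track=rewrite | github.com/YuriAoyamaSE/introducao_cc_USP | semana7/opcionais/soma_hipotenusas.py | possui_catetos_int
-- ===== SOURCE A (Python) =====
-- def possui_catetos_int(h: int) -> bool:
--     i = 1
--     j = 1
--     while i < h:
--         j = 1
--         i += 1
--         while j < h:
--             j +=1
--             if (i**2 + j**2) == (h**2):
--                 return True
--     return False
-- ===== SOURCE B (Python) =====
-- def possui_catetos_int(h: int) -> bool:
--     # Two-pointer scan: i moves up, j moves down; O(h) instead of O(h^2).
--     i, j = 1, h - 1
--     t = h * h
--     while i <= j:
--         s = i * i + j * j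
--         if s == t:
--             return True
--         if s < t:
--             i += 1
--         else:
--             j -= 1
--     return False
-- ===== Notes on version B (the rewrite author's own statement) =====
-- stated objective: faster
-- what changed: Replaced the nested brute-force scan over all (i,j) pairs with a single two-pointer sweep (i up from 1, j down from h-1) driven by comparing i*i+j*j with h*h.
import Mathlib
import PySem

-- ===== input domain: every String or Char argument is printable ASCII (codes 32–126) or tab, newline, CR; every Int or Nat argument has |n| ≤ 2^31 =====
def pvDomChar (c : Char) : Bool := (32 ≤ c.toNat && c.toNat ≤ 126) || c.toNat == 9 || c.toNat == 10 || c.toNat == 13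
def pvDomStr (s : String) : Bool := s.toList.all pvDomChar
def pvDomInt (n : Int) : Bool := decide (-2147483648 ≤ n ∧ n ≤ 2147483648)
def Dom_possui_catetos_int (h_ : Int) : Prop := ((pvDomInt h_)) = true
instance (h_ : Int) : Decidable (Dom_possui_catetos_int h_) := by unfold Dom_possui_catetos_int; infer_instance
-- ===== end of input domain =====

-- B replaces A's nested O(h^2) pair scan by a single two-pointer sweep (objective: faster).
-- Both loops are written with an exact Nat fuel ((h-j).toNat resp. (j-i+1).toNat iterations
-- remain) purely to make the recursion structural; the fuel is always sufficient.

-- ===== PORT A =====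
-- inner 'while j < h: j += 1; if i**2 + j**2 == h**2: return True'
def pvInnerA (h i : Int) (fuel : Nat) (j : Int) : Bool :=
  match fuel with
  | 0 => false
  | n + 1 =>
    if j < h then
      let j' := j + 1
      if i * i + j' * j' = h * h then true else pvInnerA h i n j'
    else false

-- outer 'while i < h: j = 1; i += 1; <inner loop>'
def pvOuterA (h : Int) (fuel : Nat) (i : Int) : Bool :=
  match fuel with
  | 0 => false
  | n + 1 =>
    if i < h then
      let i' := i + 1
      if pvInnerA h i' (h - 1).toNat 1 then true else pvOuterA h n i'
    else false

def possui_catetos_int (h_ : Int) : Bool := pvOuterA h_ (h_ - 1).toNat 1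

-- ===== PORT B =====
-- two-pointer loop of Source B: i up from 1, j down from h-1
def pvLoopB (h : Int) (fuel : Nat) (i j : Int) : Bool :=
  match fuel with
  | 0 => false
  | n + 1 =>
    if i ≤ j then
      let s := i * i + j * j
      if s = h * h then true
      else if s < h * h then pvLoopB h n (i + 1) j
      else pvLoopB h n i (j - 1)
    else false

def possui_catetos_int_alt (h_ : Int) : Bool := pvLoopB h_ (h_ - 1).toNat 1 (h_ - 1)

-- ===== PRECONDITION & SPEC =====
def Spec_possui_catetos_int (h_ : Int) (out : Bool) : Prop := out = possui_catetos_int_alt h_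
instance (h_ : Int) (out : Bool) : Decidable (Spec_possui_catetos_int h_ out) := by unfold Spec_possui_catetos_int; infer_instance

-- ===== CLAIM (what is proved, stated in full; the proofs are below) =====
def Claim_equal_possui_catetos_int : Prop := ∀ (h_ : Int), Dom_possui_catetos_int h_ → Spec_possui_catetos_int h_ (possui_catetos_int h_)

-- ===== LEMMAS AND PROOFS =====

theorem pvInnerA_iff (h i : Int) (n : Nat) :
    ∀ j : Int, (h - j).toNat ≤ n →
      (pvInnerA h i n j = true ↔ ∃ k : Int, j < k ∧ k ≤ h ∧ i * i + k * k = h * h) := by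
  induction n with
  | zero =>
      intro j hn
      simp only [pvInnerA, Bool.false_eq_true, false_iff]
      rintro ⟨k, h1, h2, _⟩; omega
  | succ n ih =>
      intro j hn
      by_cases hj : j < h
      · simp only [pvInnerA, if_pos hj]
        by_cases hhit : i * i + (j + 1) * (j + 1) = h * h
        · simp only [if_pos hhit]
          exact ⟨fun _ => ⟨j + 1, by omega, by omega, hhit⟩, fun _ => trivial⟩
        · simp only [if_neg hhit]
          rw [ih (j + 1) (by omega)]
          constructor
          · rintro ⟨k, h1, h2, h3⟩; exact ⟨k, by omega, h2, h3⟩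
          · rintro ⟨k, h1, h2, h3⟩
            refine ⟨k, ?_, h2, h3⟩
            rcases lt_or_eq_of_le (by omega : j + 1 ≤ k) with hlt | heq
            · exact hlt
            · exact absurd (show i * i + (j + 1) * (j + 1) = h * h by rw [heq]; exact h3) hhit
      · simp only [pvInnerA, if_neg hj, Bool.false_eq_true, false_iff]
        rintro ⟨k, h1, h2, _⟩; omega

theorem pvOuterA_iff (h : Int) (n : Nat) :
    ∀ i : Int, (h - i).toNat ≤ n →
      (pvOuterA h n i = true ↔
        ∃ a : Int, i < a ∧ a ≤ h ∧ ∃ k : Int, 1 < k ∧ k ≤ h ∧ a * a + k * k = h * h) := by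
  induction n with
  | zero =>
      intro i hn
      simp only [pvOuterA, Bool.false_eq_true, false_iff]
      rintro ⟨a, h1, h2, _⟩; omega
  | succ n ih =>
      intro i hi
      by_cases hlt : i < h
      · simp only [pvOuterA, if_pos hlt]
        by_cases hhit : pvInnerA h (i + 1) (h - 1).toNat 1 = true
        · simp only [if_pos hhit]
          exact ⟨fun _ => ⟨i + 1, by omega, by omega,
                   (pvInnerA_iff h (i + 1) (h - 1).toNat 1 (by omega)).mp hhit⟩,
                 fun _ => trivial⟩
        · simp only [if_neg hhit]
          rw [ih (i + 1) (by omega)]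
          constructor
          · rintro ⟨a, h1, h2, hk⟩; exact ⟨a, by omega, h2, hk⟩
          · rintro ⟨a, h1, h2, hk⟩
            rcases lt_or_eq_of_le (by omega : i + 1 ≤ a) with hlt' | heq
            · exact ⟨a, hlt', h2, hk⟩
            · exact absurd ((pvInnerA_iff h (i + 1) (h - 1).toNat 1 (by omega)).mpr
                (heq ▸ hk)) hhit
      · simp only [pvOuterA, if_neg hlt, Bool.false_eq_true, false_iff]
        rintro ⟨a, h1, h2, _⟩; omega

-- the hypothesis 0 ≤ i is needed: with both pointers allowed negative the sweep is incomplete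
theorem pvLoopB_iff (h : Int) (n : Nat) :
    ∀ i j : Int, 0 ≤ i → (j - i + 1).toNat ≤ n →
      (pvLoopB h n i j = true ↔
        ∃ a b : Int, i ≤ a ∧ a ≤ b ∧ b ≤ j ∧ a * a + b * b = h * h) := by
  induction n with
  | zero =>
      intro i j hi hn
      simp only [pvLoopB, Bool.false_eq_true, false_iff]
      rintro ⟨a, b, h1, h2, h3, _⟩; omega
  | succ n ih =>
      intro i j hi hn
      by_cases hij : i ≤ j
      · by_cases hhit : i * i + j * j = h * h
        · simp only [pvLoopB, if_pos hij, if_pos hhit]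
          exact ⟨fun _ => ⟨i, j, le_refl _, hij, le_refl _, hhit⟩, fun _ => trivial⟩
        · by_cases hlt : i * i + j * j < h * h
          · simp only [pvLoopB, if_pos hij, if_neg hhit, if_pos hlt]
            rw [ih (i + 1) j (by omega) (by omega)]
            constructor
            · rintro ⟨a, b, h1, h2, h3, h4⟩; exact ⟨a, b, by omega, h2, h3, h4⟩
            · rintro ⟨a, b, h1, h2, h3, h4⟩
              rcases lt_or_eq_of_le h1 with hlt' | heq
              · exact ⟨a, b, by omega, h2, h3, h4⟩
              · -- a = i: then a*a + b*b ≤ i*i + j*j < h*h, contradicting h4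
                exfalso
                subst heq
                have hb : b * b ≤ j * j := mul_self_le_mul_self (by omega) h3
                linarith
          · simp only [pvLoopB, if_pos hij, if_neg hhit, if_neg hlt]
            rw [ih i (j - 1) hi (by omega)]
            constructor
            · rintro ⟨a, b, h1, h2, h3, h4⟩; exact ⟨a, b, h1, h2, by omega, h4⟩
            · rintro ⟨a, b, h1, h2, h3, h4⟩
              rcases lt_or_eq_of_le h3 with hlt' | heq
              · exact ⟨a, b, h1, h2, by omega, h4⟩
              · -- b = j: then a*a + b*b ≥ i*i + j*j > h*h (≥ and ≠), contradicting h4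
                exfalso
                subst heq
                have ha : i * i ≤ a * a := mul_self_le_mul_self hi h1
                push Not at hlt hhit
                exact hhit (by linarith)
      · simp only [pvLoopB, if_neg hij, Bool.false_eq_true, false_iff]
        rintro ⟨a, b, h1, h2, h3, _⟩; omega

theorem pv_props_iff (h : Int) :
    (∃ a : Int, 1 < a ∧ a ≤ h ∧ ∃ k : Int, 1 < k ∧ k ≤ h ∧ a * a + k * k = h * h) ↔
    (∃ a b : Int, 1 ≤ a ∧ a ≤ b ∧ b ≤ h - 1 ∧ a * a + b * b = h * h) := by
  constructor
  · rintro ⟨a, ha1, ha2, k, hk1, hk2, heq⟩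
    have hah : a < h := by by_contra hc; push Not at hc; nlinarith
    have hkh : k < h := by by_contra hc; push Not at hc; nlinarith
    rcases le_total a k with hak | hka
    · exact ⟨a, k, by omega, hak, by omega, heq⟩
    · exact ⟨k, a, by omega, hka, by omega, by linarith [heq]⟩
  · rintro ⟨a, b, h1, h2, h3, h4⟩
    have hh2 : 2 ≤ h := by omega
    have ha2 : 2 ≤ a := by
      by_contra hc
      have ha1 : a = 1 := by omega
      subst ha1
      have hbb : b * b ≤ (h - 1) * (h - 1) := by nlinarith
      nlinarith
    exact ⟨a, by omega, by omega, b, by omega, by omega, h4⟩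

theorem pv_eq (h : Int) : possui_catetos_int h = possui_catetos_int_alt h := by
  unfold possui_catetos_int possui_catetos_int_alt
  rw [Bool.eq_iff_iff, pvOuterA_iff h (h - 1).toNat 1 (by omega),
      pvLoopB_iff h (h - 1).toNat 1 (h - 1) (by norm_num) (by omega)]
  exact pv_props_iff h

-- ===== VERDICT (by name: the statement is the Claim_ definition above) =====
theorem possui_catetos_int_spec : Claim_equal_possui_catetos_int := by
  intro h _
  exact pv_eq h
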